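-- pv_equiv track=rewrite | github.com/navmou/lunar_lander | logic.py | diagonal_plus_2_turn
-- ===== SOURCE A (Python) =====
-- def diagonal_plus_2_turn(board , player , x , y , turning_list , counter):
--
--     if x > 0 and y > 0:
--         if board[x-1][y-1] == -player:
--             counter+=1
--             turning_list.append((x-1,y-1))
--             return diagonal_plus_2_turn(board,player,x-1,y-1, turning_list , counter)
--         elif board[x-1][y-1] == player:
--             return turning_list
--         else:
--             for i in range(counter):
--                 turning_list.pop(-1)
--             return turning_list
--     else:
--         return turning_list
-- ===== SOURCE B (Python) =====
-- def diagonal_plus_2_turn(board, player, x, y, turning_list, counter):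
--     # One linear scan collects the run of opponent pieces along the up-left
--     # diagonal, then a single arithmetic trim replaces A's pop loop.
--     run = []
--     while x > 0 and y > 0 and board[x - 1][y - 1] == -player:
--         run.append((x - 1, y - 1))
--         x -= 1
--         y -= 1
--     turning_list.extend(run)
--     if x > 0 and y > 0 and board[x - 1][y - 1] != player:
--         n = counter + len(run)
--         if n > 0:
--             del turning_list[-n:]
--     return turning_list
-- ===== Notes on version B (the rewrite author's own statement) =====
-- stated objective: alternative
-- what changed: Replaces A's tail recursion with mid-walk rollback (append each piece, then pop counter items on failure) by a single iterative linear scan that first collects the run of opponent pieces and then applies one arithmetic trim (delete the last counter+len(run) elements, clamped) instead of a pop loop.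
import Mathlib
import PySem

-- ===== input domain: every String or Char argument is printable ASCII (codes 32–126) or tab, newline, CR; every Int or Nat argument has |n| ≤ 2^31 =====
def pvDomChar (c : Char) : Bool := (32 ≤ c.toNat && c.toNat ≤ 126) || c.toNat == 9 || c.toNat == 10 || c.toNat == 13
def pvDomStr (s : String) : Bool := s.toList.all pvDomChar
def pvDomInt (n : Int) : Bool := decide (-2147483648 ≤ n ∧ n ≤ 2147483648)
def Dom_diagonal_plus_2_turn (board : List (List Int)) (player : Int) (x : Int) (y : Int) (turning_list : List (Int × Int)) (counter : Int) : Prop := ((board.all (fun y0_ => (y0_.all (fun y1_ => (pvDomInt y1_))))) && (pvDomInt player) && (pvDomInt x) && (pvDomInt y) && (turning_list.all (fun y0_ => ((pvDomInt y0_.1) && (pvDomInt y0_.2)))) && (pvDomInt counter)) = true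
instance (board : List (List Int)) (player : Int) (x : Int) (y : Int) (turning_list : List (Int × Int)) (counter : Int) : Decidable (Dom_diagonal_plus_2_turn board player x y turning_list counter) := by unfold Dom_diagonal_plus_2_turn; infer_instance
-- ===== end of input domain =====

-- B replaces A's recursion-with-rollback by one iterative linear scan that collects the run of
-- opponent pieces and a single arithmetic trim (objective: alternative decomposition).
-- Both A and B mutate turning_list in place in Python and return that same list, so the
-- return-value equivalence proved here also describes the final list state.


-- ===== PORT A =====
-- board[x-1][y-1]; the .getD defaults are only reached when Python raises IndexError,
-- which Pre_ excludes.
def pvCellA (board : List (List Int)) (x : Int) (y : Int) : Int :=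
  ((PySem.List.pyGet? board (x - 1)).getD []) |> fun row => (PySem.List.pyGet? row (y - 1)).getD 0

-- 'for i in range(counter): turning_list.pop(-1)'; pop(-1) on a nonempty list is dropLast
-- (Pre_ excludes the pops from an empty list, where Python raises IndexError).
def pvPopLoop (turning_list : List (Int × Int)) (counter : Int) : List (Int × Int) :=
  (PySem.List.pyRange 0 counter 1).foldl (fun acc _ => acc.dropLast) turning_list

def diagonal_plus_2_turn (board : List (List Int)) (player : Int) (x : Int) (y : Int) (turning_list : List (Int × Int)) (counter : Int) : List (Int × Int) :=
  if 0 < x ∧ 0 < y then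
    if pvCellA board x y = -player then
      diagonal_plus_2_turn board player (x - 1) (y - 1) (turning_list ++ [(x - 1, y - 1)]) (counter + 1)
    else if pvCellA board x y = player then
      turning_list
    else
      pvPopLoop turning_list counter
  else
    turning_list
termination_by x.toNat
decreasing_by omega

-- ===== PORT B =====
-- the while loop: returns (x, y, run) after the scan stops
def pvCollectRun (board : List (List Int)) (player : Int) (x : Int) (y : Int) (run : List (Int × Int)) : Int × Int × List (Int × Int) :=
  if 0 < x ∧ 0 < y ∧ pvCellA board x y = -player then
    pvCollectRun board player (x - 1) (y - 1) (run ++ [(x - 1, y - 1)])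
  else
    (x, y, run)
termination_by x.toNat
decreasing_by omega

def diagonal_plus_2_turn_alt (board : List (List Int)) (player : Int) (x : Int) (y : Int) (turning_list : List (Int × Int)) (counter : Int) : List (Int × Int) :=
  let r := pvCollectRun board player x y []
  let tl := turning_list ++ r.2.2
  if 0 < r.1 ∧ 0 < r.2.1 ∧ pvCellA board r.1 r.2.1 ≠ player then
    let n := counter + (r.2.2.length : Int)
    if 0 < n then tl.take (tl.length - n.toNat)  -- 'del tl[-n:]' keeps tl[:len-n], clamped at 0
    else tl
  else
    tl

-- ===== PRECONDITION & SPEC =====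
-- helpers describing the k-th cell on the scanned diagonal, as plain input shape conditions
def pvRow (board : List (List Int)) (x : Int) (k : ℕ) : List Int := board.getD (x - 1 - (k : Int)).toNat []
abbrev pvCellOk (board : List (List Int)) (x y : Int) (k : ℕ) : Prop :=
  x - 1 - (k : Int) < (board.length : Int) ∧ y - 1 - (k : Int) < ((pvRow board x k).length : Int)
def pvCellVal (board : List (List Int)) (x y : Int) (k : ℕ) : Int :=
  (pvRow board x k).getD (y - 1 - (k : Int)).toNat 0

-- Pre_ excludes EXACTLY the inputs on which Python A raises: walks whose k-th step (all
-- earlier diagonal cells holding opponent pieces) reads past the board (IndexError), and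
-- walks that end on an in-bounds empty cell while counter exceeds len(turning_list), where
-- the pop loop pops from an empty list (IndexError). On every input A returns on, Pre_ holds.
def Pre_diagonal_plus_2_turn (board : List (List Int)) (player : Int) (x : Int) (y : Int) (turning_list : List (Int × Int)) (counter : Int) : Prop :=
  ¬ ∃ k : ℕ, k < board.length + 1 ∧ (k : Int) < x ∧ (k : Int) < y ∧
      (∀ j < k, pvCellOk board x y j ∧ pvCellVal board x y j = -player) ∧
      (¬ pvCellOk board x y k ∨
        (pvCellVal board x y k ≠ player ∧ pvCellVal board x y k ≠ -player ∧
          (turning_list.length : Int) < counter))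

instance (board : List (List Int)) (player : Int) (x : Int) (y : Int) (turning_list : List (Int × Int)) (counter : Int) : Decidable (Pre_diagonal_plus_2_turn board player x y turning_list counter) := by unfold Pre_diagonal_plus_2_turn; infer_instance

def pvWitness_diagonal_plus_2_turn : List (List Int) × Int × Int × Int × (List (Int × Int)) × Int :=
  ([[1, 0], [0, -1]], 1, 2, 2, [], 0)

def Spec_diagonal_plus_2_turn (board : List (List Int)) (player : Int) (x : Int) (y : Int) (turning_list : List (Int × Int)) (counter : Int) (out : List (Int × Int)) : Prop := out = diagonal_plus_2_turn_alt board player x y turning_list counter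
instance (board : List (List Int)) (player : Int) (x : Int) (y : Int) (turning_list : List (Int × Int)) (counter : Int) (out : List (Int × Int)) : Decidable (Spec_diagonal_plus_2_turn board player x y turning_list counter out) := by unfold Spec_diagonal_plus_2_turn; infer_instance

-- ===== CLAIM (what is proved, stated in full; the proofs are below) =====
def Claim_equal_diagonal_plus_2_turn : Prop := ∀ (board : List (List Int)) (player : Int) (x : Int) (y : Int) (turning_list : List (Int × Int)) (counter : Int), Dom_diagonal_plus_2_turn board player x y turning_list counter → Pre_diagonal_plus_2_turn board player x y turning_list counter → Spec_diagonal_plus_2_turn board player x y turning_list counter (diagonal_plus_2_turn board player x y turning_list counter)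

-- ===== LEMMAS AND PROOFS =====

-- accumulator lemma for the B-side scan
theorem pvCollectRun_acc (board : List (List Int)) (player : Int) (x : Int) (y : Int)
    (a b : List (Int × Int)) :
    pvCollectRun board player x y (a ++ b) =
      ((pvCollectRun board player x y b).1, (pvCollectRun board player x y b).2.1,
        a ++ (pvCollectRun board player x y b).2.2) := by
  fun_induction pvCollectRun board player x y b generalizing a with
  | case1 x y run h ih =>
      conv_lhs => rw [pvCollectRun, if_pos h]
      rw [List.append_assoc, ih a]
  | case2 x y run h =>
      conv_lhs => rw [pvCollectRun, if_neg h]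

-- the pop loop is a take
theorem pv_foldl_dropLast {α : Type} (L : List Int) : ∀ (l : List α),
    L.foldl (fun acc _ => acc.dropLast) l = l.take (l.length - L.length) := by
  induction L with
  | nil => intro l; simp
  | cons a L ih =>
      intro l
      rw [List.foldl_cons]
      show List.foldl _ l.dropLast L = _
      rw [ih l.dropLast, List.length_dropLast, List.dropLast_eq_take, List.take_take]
      congr 1
      simp only [List.length_cons]
      omega

theorem pvPopLoop_eq_take (l : List (Int × Int)) (c : Int) :
    pvPopLoop l c = l.take (l.length - c.toNat) := by
  rw [pvPopLoop, pv_foldl_dropLast, PySem.List.length_pyRange_one]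
  norm_num

-- the two ports agree on every input (Pre_ is what makes them faithful to their Pythons)
theorem pv_main (board : List (List Int)) (player : Int) (x : Int) (y : Int)
    (turning_list : List (Int × Int)) (counter : Int) :
    diagonal_plus_2_turn board player x y turning_list counter =
      diagonal_plus_2_turn_alt board player x y turning_list counter := by
  fun_induction diagonal_plus_2_turn board player x y turning_list counter with
  | case1 x y tl c hxy hcell ih =>
      rw [ih]
      have hstep : pvCollectRun board player x y [] =
          ((pvCollectRun board player (x - 1) (y - 1) []).1,
           (pvCollectRun board player (x - 1) (y - 1) []).2.1,
           (x - 1, y - 1) :: (pvCollectRun board player (x - 1) (y - 1) []).2.2) := by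
        conv_lhs => rw [pvCollectRun, if_pos ⟨hxy.1, hxy.2, hcell⟩]
        simpa using pvCollectRun_acc board player (x - 1) (y - 1) [(x - 1, y - 1)] []
      unfold diagonal_plus_2_turn_alt
      rw [hstep]
      generalize pvCollectRun board player (x - 1) (y - 1) [] = r
      obtain ⟨x', y', run'⟩ := r
      simp only [List.append_assoc, List.singleton_append, List.length_cons]
      push_cast
      rw [show c + 1 + (run'.length : Int) = c + ((run'.length : Int) + 1) from by ring]
  | case2 x y tl c hxy hcell1 hcell2 =>
      have hr : pvCollectRun board player x y [] = (x, y, []) := by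
        conv_lhs => rw [pvCollectRun, if_neg (fun h => hcell1 h.2.2)]
      unfold diagonal_plus_2_turn_alt
      rw [hr]
      simp [hcell2]
  | case3 x y tl c hxy hcell1 hcell2 =>
      have hr : pvCollectRun board player x y [] = (x, y, []) := by
        conv_lhs => rw [pvCollectRun, if_neg (fun h => hcell1 h.2.2)]
      unfold diagonal_plus_2_turn_alt
      rw [hr]
      simp only [List.append_nil, List.length_nil, Nat.cast_zero, add_zero]
      rw [if_pos ⟨hxy.1, hxy.2, hcell2⟩, pvPopLoop_eq_take]
      split_ifs with h
      · rfl
      · have h0 : c.toNat = 0 := by omega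
        simp [h0]
  | case4 x y tl c hxy =>
      have hr : pvCollectRun board player x y [] = (x, y, []) := by
        conv_lhs => rw [pvCollectRun, if_neg (fun h => hxy ⟨h.1, h.2.1⟩)]
      unfold diagonal_plus_2_turn_alt
      rw [hr]
      simp only []
      rw [if_neg (fun h => hxy ⟨h.1, h.2.1⟩)]
      simp

-- ===== VERDICT (by name: the statement is the Claim_ definition above) =====
theorem diagonal_plus_2_turn_spec : Claim_equal_diagonal_plus_2_turn := by
  intro board player x y tl c _ _
  exact pv_main board player x y tl c
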